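-- pv_equiv track=rewrite | github.com/ruminaider/bash-validator | hooks/bash-validator.py | _contains_unquoted
-- ===== SOURCE A (Python) =====
-- def _contains_unquoted(cmd, pattern):
--     """Check if pattern appears outside single/double quotes."""
--     i = 0
--     while i < len(cmd):
--         if cmd[i] == "'":
--             j = cmd.find("'", i + 1)
--             if j == -1:
--                 break
--             i = j + 1
--         elif cmd[i] == '"':
--             j = i + 1
--             while j < len(cmd):
--                 if cmd[j] == '\\':
--                     j += 2
--                     continue
--                 if cmd[j] == '"':
--                     break
--                 j += 1
--             i = j + 1
--         elif cmd[i:i + len(pattern)] == pattern: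
--             return True
--         else:
--             i += 1
--     return False
-- ===== SOURCE B (Python) =====
-- def _contains_unquoted(cmd, pattern):
--     n = len(cmd)
--     # Pass 1: split cmd into its maximal unquoted runs [a, b) using only the
--     # quote-skipping state machine (no pattern matching here).
--     segs = []
--     i = 0
--     start = 0
--     while i < n:
--         c = cmd[i]
--         if c == "'":
--             if start < i:
--                 segs.append((start, i))
--             j = cmd.find("'", i + 1)
--             if j == -1:
--                 start = n  # unclosed single quote: nothing further is unquoted
--                 break
--             i = j + 1
--             start = i
--         elif c == '"':
--             if start < i:
--                 segs.append((start, i))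
--             j = i + 1
--             while j < n:
--                 if cmd[j] == '\\':
--                     j += 2
--                 elif cmd[j] == '"':
--                     break
--                 else:
--                     j += 1
--             i = j + 1
--             start = i
--         else:
--             i += 1
--     if start < n:
--         segs.append((start, n))
--     # Pass 2: try the raw cmd slice at every index of every unquoted run.
--     m = len(pattern)
--     for a, b in segs:
--         for k in range(a, b):
--             if cmd[k:k + m] == pattern:
--                 return True
--     return False
-- ===== Notes on version B (the rewrite author's own statement) =====
-- stated objective: alternative
-- what changed: A interleaves quote-skipping and pattern matching in one loop; B first runs the quote state machine alone to split cmd into maximal unquoted runs (start,end), then in a separate pass tries the raw cmd slice at every index of every run.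
import Mathlib
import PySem

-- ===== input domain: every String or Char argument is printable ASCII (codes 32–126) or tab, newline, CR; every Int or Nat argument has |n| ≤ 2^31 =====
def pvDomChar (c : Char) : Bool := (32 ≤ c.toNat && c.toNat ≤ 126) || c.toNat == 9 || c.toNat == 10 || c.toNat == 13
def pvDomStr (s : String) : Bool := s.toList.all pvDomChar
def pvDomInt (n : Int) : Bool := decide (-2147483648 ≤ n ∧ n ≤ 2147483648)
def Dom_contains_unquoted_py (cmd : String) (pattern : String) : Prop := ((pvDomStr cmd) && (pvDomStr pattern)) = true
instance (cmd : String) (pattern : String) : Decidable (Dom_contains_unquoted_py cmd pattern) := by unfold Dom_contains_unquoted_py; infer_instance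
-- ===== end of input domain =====

-- A interleaves quote skipping with pattern matching in one loop; B first splits cmd
-- into its maximal unquoted runs [a,b) and then, in a separate pass, matches the raw
-- slice at every index of every run; equal return value, objective: alternative decomposition.
-- Loops are ported with a fuel counter (cmd.length + 1, never exhausted since the index
-- strictly increases while < length) so the recursion is structural.

-- ===== PORT A =====

-- inner `while j < len(cmd)` double-quote scan (identical inner loop in Source A and Source B)
def pvDqScan (cs : List Char) (fuel j : Nat) : Nat :=
  match fuel with
  | 0 => j
  | fuel + 1 =>
    if j < cs.length then
      if cs.getD j ' ' = '\\' then pvDqScan cs fuel (j + 2)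
      else if cs.getD j ' ' = '"' then j
      else pvDqScan cs fuel (j + 1)
    else j

-- the outer `while i < len(cmd)` loop of A, step for step
def pvALoop (cs ps : List Char) (fuel i : Nat) : Bool :=
  match fuel with
  | 0 => false
  | fuel + 1 =>
    if i < cs.length then
      if cs.getD i ' ' = '\'' then
        if PySem.Chars.findFrom cs ['\''] ((i : Int) + 1) none = -1 then false
        else pvALoop cs ps fuel ((PySem.Chars.findFrom cs ['\''] ((i : Int) + 1) none).toNat + 1)
      else if cs.getD i ' ' = '"' then
        pvALoop cs ps fuel (pvDqScan cs (cs.length + 1) (i + 1) + 1)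
      else if PySem.List.slice cs (some (i : Int)) (some ((i : Int) + (ps.length : Int))) = ps then true
      else pvALoop cs ps fuel (i + 1)
    else false

def contains_unquoted_py (cmd : String) (pattern : String) : Bool :=
  pvALoop cmd.toList pattern.toList (cmd.toList.length + 1) 0

-- ===== PORT B =====

-- pass 1 of Source B: the quote state machine alone, emitting the maximal unquoted runs
-- [start, i) as (start, i) pairs; `start` tracks where the current run began
def pvSegs (cs : List Char) (fuel i start : Nat) : List (Nat × Nat) :=
  match fuel with
  | 0 => []
  | fuel + 1 =>
    if i < cs.length then
      if cs.getD i ' ' = '\'' then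
        (if start < i then [(start, i)] else []) ++
        (if PySem.Chars.findFrom cs ['\''] ((i : Int) + 1) none = -1 then []
         else pvSegs cs fuel ((PySem.Chars.findFrom cs ['\''] ((i : Int) + 1) none).toNat + 1)
                ((PySem.Chars.findFrom cs ['\''] ((i : Int) + 1) none).toNat + 1))
      else if cs.getD i ' ' = '"' then
        (if start < i then [(start, i)] else []) ++
        pvSegs cs fuel (pvDqScan cs (cs.length + 1) (i + 1) + 1)
               (pvDqScan cs (cs.length + 1) (i + 1) + 1)
      else pvSegs cs fuel (i + 1) start
    else if start < cs.length then [(start, cs.length)] else []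

-- the raw-slice test `cmd[k:k+len(pattern)] == pattern` of pass 2
def pvHit (cs ps : List Char) (k : Nat) : Bool :=
  PySem.List.slice cs (some (k : Int)) (some ((k : Int) + (ps.length : Int))) = ps

-- pass 2 of Source B: for a,b in segs: for k in range(a,b): if hit: return True
def contains_unquoted_py_alt (cmd : String) (pattern : String) : Bool :=
  (pvSegs cmd.toList (cmd.toList.length + 1) 0 0).any
    (fun ab => (List.range' ab.1 (ab.2 - ab.1)).any (pvHit cmd.toList pattern.toList))

-- ===== PRECONDITION & SPEC =====
def Spec_contains_unquoted_py (cmd : String) (pattern : String) (out : Bool) : Prop := out = contains_unquoted_py_alt cmd pattern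
instance (cmd : String) (pattern : String) (out : Bool) : Decidable (Spec_contains_unquoted_py cmd pattern out) := by unfold Spec_contains_unquoted_py; infer_instance

-- ===== CLAIM (what is proved, stated in full; the proofs are below) =====
def Claim_equal_contains_unquoted_py : Prop := ∀ (cmd : String) (pattern : String), Dom_contains_unquoted_py cmd pattern → Spec_contains_unquoted_py cmd pattern (contains_unquoted_py cmd pattern)

-- ===== LEMMAS AND PROOFS =====

theorem pvDqScan_ge (cs : List Char) (fuel j : Nat) : j ≤ pvDqScan cs fuel j := by
  induction fuel generalizing j with
  | zero => simp [pvDqScan]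
  | succ fuel ih =>
    rw [pvDqScan]
    split_ifs with h1 h2 h3
    · exact le_trans (by omega) (ih (j + 2))
    · exact le_refl j
    · exact le_trans (by omega) (ih (j + 1))
    · exact le_refl j

-- the heart of the equivalence: B's "runs then match" equals the pending-run matches
-- plus A's interleaved loop from the same position
theorem pvSegs_any_eq (cs ps : List Char) (fuel i start : Nat)
    (hsi : start ≤ i) (hin : start = i ∨ i ≤ cs.length)
    (hfuel : cs.length + 1 ≤ fuel + i) :
    (pvSegs cs fuel i start).any
        (fun ab => (List.range' ab.1 (ab.2 - ab.1)).any (pvHit cs ps))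
      = ((List.range' start (i - start)).any (pvHit cs ps) || pvALoop cs ps fuel i) := by
  induction fuel generalizing i start with
  | zero =>
    have : start = i := by omega
    subst this
    simp [pvSegs, pvALoop]
  | succ fuel ih =>
    rw [pvSegs, pvALoop]
    by_cases hlt : i < cs.length
    · simp only [if_pos hlt]
      by_cases hq : cs.getD i ' ' = '\''
      · simp only [if_pos hq]
        by_cases hf : PySem.Chars.findFrom cs ['\''] ((i : Int) + 1) none = -1
        · simp only [if_pos hf]
          have hrange : List.range' start (i - start) =
              (if start < i then [(start, i)] else []).flatMap
                (fun ab => List.range' ab.1 (ab.2 - ab.1)) := by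
            split_ifs with h
            · simp
            · have : start = i := by omega
              simp [this]
          simp only [List.any_append, List.any_nil, Bool.or_false]
          rw [hrange]
          split_ifs with h <;> simp
        · simp only [if_neg hf]
          have hspec := PySem.Chars.findFrom_natCast_spec cs ['\''] (i + 1)
            (by omega) (by push_cast; exact hf)
          have hcast : ((i + 1 : Nat) : Int) = (i : Int) + 1 := by push_cast; ring
          rw [hcast] at hspec
          set f := PySem.Chars.findFrom cs ['\''] ((i : Int) + 1) none with hfdef
          have hfge : (i : Int) + 1 ≤ f := hspec.1
          have hfle : f.toNat < cs.length := by
            have hpre := hspec.2.1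
            have hne : cs.drop f.toNat ≠ [] := by
              intro h
              rw [h] at hpre
              simp at hpre
            by_contra h
            exact hne (List.drop_eq_nil_of_le (by omega))
          simp only [List.any_append]
          rw [ih (f.toNat + 1) (f.toNat + 1) (le_refl _) (Or.inr (by omega)) (by omega)]
          simp only [Nat.sub_self, List.range'_zero, List.any_nil, Bool.false_or]
          split_ifs with h
          · simp
          · have : start = i := by omega
            simp [this]
      · simp only [if_neg hq]
        by_cases hd : cs.getD i ' ' = '"'
        · simp only [if_pos hd]
          have hj := pvDqScan_ge cs (cs.length + 1) (i + 1)
          set j := pvDqScan cs (cs.length + 1) (i + 1) with hjdef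
          simp only [List.any_append]
          rw [ih (j + 1) (j + 1) (le_refl _) (Or.inl rfl) (by omega)]
          simp only [Nat.sub_self, List.range'_zero, List.any_nil, Bool.false_or]
          split_ifs with h
          · simp
          · have : start = i := by omega
            simp [this]
        · simp only [if_neg hd]
          rw [ih (i + 1) start (by omega) (Or.inr (by omega)) (by omega)]
          have hstep : List.range' start (i + 1 - start) =
              List.range' start (i - start) ++ [i] := by
            have h1 : i + 1 - start = (i - start) + 1 := by omega
            have h2 : start + (i - start) = i := by omega
            rw [h1, List.range'_concat]
            simp only [one_mul, h2]
          rw [hstep]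
          by_cases hp : PySem.List.slice cs (some (i : Int)) (some ((i : Int) + (ps.length : Int))) = ps
          · simp [hp, pvHit]
          · simp only [if_neg hp, List.any_append, List.any_cons, List.any_nil]
            have : pvHit cs ps i = false := by
              simp [pvHit, hp]
            simp [this]
    · simp only [if_neg hlt, Bool.or_false]
      by_cases hs : start < cs.length
      · have hi : i = cs.length := by omega
        subst hi
        simp [hs]
      · have : start = i := by omega
        subst this
        simp [hs]

-- ===== VERDICT (by name: the statement is the Claim_ definition above) =====
theorem contains_unquoted_py_spec : Claim_equal_contains_unquoted_py := by
  intro cmd pattern _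
  unfold Spec_contains_unquoted_py contains_unquoted_py contains_unquoted_py_alt
  rw [pvSegs_any_eq cmd.toList pattern.toList (cmd.toList.length + 1) 0 0
    (le_refl 0) (Or.inl rfl) (by omega)]
  simp
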